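-- pv_equiv track=rewrite | github.com/emdzejski/Mateusz_Janus_projects | numerical_methods/sparse_matrix.py | mat_vec_mult
-- ===== SOURCE A (Python) =====
-- def mat_vec_mult(a,x):
--     n = len(a)
--     b = n * [0]
--     for i in range(n):
--         if a.index(a[i]) % 2 == 0:
--             for j in range(0,n,2):
--                 b[i] += a[i][j] * x[j]
--         else:
--             for k in range(1,n,2):
--                 b[i] += a[i][k] * x[k]
--     return b
-- ===== SOURCE B (Python) =====
-- def mat_vec_mult(a, x):
--     n = len(a)
--     # one preliminary pass: first index at which each (duplicate) row occurs
--     first = {}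
--     for i in range(n):
--         key = tuple(a[i])
--         if key not in first:
--             first[key] = i
--     parity = [first[tuple(row)] % 2 for row in a]
--     # column-major accumulation: column j feeds exactly the rows of matching parity
--     b = n * [0]
--     for j in range(n):
--         for i in range(n):
--             if parity[i] == j % 2:
--                 b[i] += a[i][j] * x[j]
--     return b
-- ===== Notes on version B (the rewrite author's own statement) =====
-- stated objective: alternative
-- what changed: B first builds a first-occurrence-index table for the rows with one dict pass (replacing A's per-row a.index scan) and then accumulates the product column-major (outer loop over columns j, inner over rows i, adding a[i][j]*x[j] when j's parity matches the row's first-index parity), instead of A's row-major per-row strided dot products.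
import Mathlib
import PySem

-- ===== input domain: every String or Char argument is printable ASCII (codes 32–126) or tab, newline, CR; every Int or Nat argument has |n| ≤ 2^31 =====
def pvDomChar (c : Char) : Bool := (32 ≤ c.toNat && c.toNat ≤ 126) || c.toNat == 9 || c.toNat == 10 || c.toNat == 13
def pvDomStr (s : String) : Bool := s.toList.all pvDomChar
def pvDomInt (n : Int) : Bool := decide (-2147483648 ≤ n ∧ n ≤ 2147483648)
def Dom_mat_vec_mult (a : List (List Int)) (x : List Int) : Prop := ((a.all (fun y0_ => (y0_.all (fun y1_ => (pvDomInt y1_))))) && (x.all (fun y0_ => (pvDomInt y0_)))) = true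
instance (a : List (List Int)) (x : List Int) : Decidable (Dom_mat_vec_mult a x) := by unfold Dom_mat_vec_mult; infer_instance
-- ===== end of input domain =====

-- B replaces A's per-row `a.index` scan by one first-occurrence dict pass and then
-- accumulates the products column-major instead of A's row-major strided dot products
-- (alternative decomposition; same results, including which inputs are excluded by Pre_).

-- ===== PORT A =====
def mat_vec_mult (a : List (List Int)) (x : List Int) : List Int :=
  let n : Int := PySem.List.len a
  let b : List Int := PySem.List.pyRepeat [(0 : Int)] n
  (PySem.List.pyRange 0 n 1).foldl (fun b i =>
    let row := PySem.List.pyGetD a i []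
    if ((PySem.List.index? a row).getD 0) % 2 == 0 then
      (PySem.List.pyRange 0 n 2).foldl (fun b j =>
        PySem.List.pySetD b i (PySem.List.pyGetD b i 0 +
          PySem.List.pyGetD row j 0 * PySem.List.pyGetD x j 0)) b
    else
      (PySem.List.pyRange 1 n 2).foldl (fun b k =>
        PySem.List.pySetD b i (PySem.List.pyGetD b i 0 +
          PySem.List.pyGetD row k 0 * PySem.List.pyGetD x k 0)) b) b

-- ===== PORT B =====
def mat_vec_mult_alt (a : List (List Int)) (x : List Int) : List Int :=
  let n : Int := PySem.List.len a
  let first : PySem.Dict (List Int) Int :=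
    (PySem.List.pyRange 0 n 1).foldl (fun d i =>
      let key := PySem.List.pyGetD a i []
      if d.contains key then d else d.insert key i) PySem.Dict.empty
  let parity : List Int := a.map (fun row => PySem.Int.mod (first.getD row 0) 2)
  let b : List Int := PySem.List.pyRepeat [(0 : Int)] n
  (PySem.List.pyRange 0 n 1).foldl (fun b j =>
    (PySem.List.pyRange 0 n 1).foldl (fun b i =>
      if PySem.List.pyGetD parity i 0 == PySem.Int.mod j 2 then
        PySem.List.pySetD b i (PySem.List.pyGetD b i 0 +
          PySem.List.pyGetD (PySem.List.pyGetD a i []) j 0 * PySem.List.pyGetD x j 0)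
      else b) b) b

-- ===== PRECONDITION & SPEC =====
-- Pre_ excludes exactly the inputs where the Python raises IndexError: some needed
-- a[i][j] or x[j] (j of the parity selected by row i's first-occurrence index) is missing.
def Pre_mat_vec_mult (a : List (List Int)) (x : List Int) : Prop :=
  ∀ i < a.length, ∀ j < a.length,
    j % 2 = (List.idxOf (a.getD i []) a) % 2 → j < (a.getD i []).length ∧ j < x.length
instance (a : List (List Int)) (x : List Int) : Decidable (Pre_mat_vec_mult a x) := by
  unfold Pre_mat_vec_mult; infer_instance
def pvWitness_mat_vec_mult : List (List Int) × List Int := ([[1, 2], [3, 4]], [1, 1])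
def Spec_mat_vec_mult (a : List (List Int)) (x : List Int) (out : List Int) : Prop := out = mat_vec_mult_alt a x
instance (a : List (List Int)) (x : List Int) (out : List Int) : Decidable (Spec_mat_vec_mult a x out) := by unfold Spec_mat_vec_mult; infer_instance

-- ===== CLAIM (what is proved, stated in full; the proofs are below) =====
def Claim_equal_mat_vec_mult : Prop := ∀ (a : List (List Int)) (x : List Int), Dom_mat_vec_mult a x → Pre_mat_vec_mult a x → Spec_mat_vec_mult a x (mat_vec_mult a x)

-- ===== LEMMAS AND PROOFS =====

-- the parity of the first index at which row i of a occurs (A's a.index(a[i]) % 2)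
def pvPar (a : List (List Int)) (i : Nat) : Nat := (List.idxOf (a.getD i []) a) % 2
-- the (i,j) product term, total-default form
def pvRowf (a : List (List Int)) (x : List Int) (i j : Nat) : Int :=
  ((a.getD i []).getD j 0) * (x.getD j 0)
-- per-row value both ports compute
def pvS (a : List (List Int)) (x : List Int) (i : Nat) : Int :=
  (((List.range a.length).filter (fun j => j % 2 == pvPar a i)).map (pvRowf a x i)).sum
-- common normal form of both ports
def pvNF (a : List (List Int)) (x : List Int) : List Int :=
  (List.range a.length).map (pvS a x)

lemma pv_getD_set_self (b : List Int) (k : Nat) (hk : k < b.length) (v : Int) :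
    (b.set k v).getD k 0 = v := by
  rw [List.getD_eq_getElem _ _ (by simpa using hk)]
  exact List.getElem_set_self (by simpa using hk)

lemma pv_getD_set_ne (b : List Int) (i k : Nat) (h : k ≠ i) (v : Int) :
    (b.set i v).getD k 0 = b.getD k 0 := by
  rw [List.getD_eq_getElem?_getD, List.getD_eq_getElem?_getD,
    List.getElem?_set_ne (Ne.symm h)]

-- A's inner strided loop is a single read-modify-write of cell i
lemma pv_inner (L : List Int) (b : List Int) (i : Nat) (f : Int → Int) :
    L.foldl (fun b' j => PySem.List.pySetD b' (i : Int) (PySem.List.pyGetD b' (i : Int) 0 + f j)) b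
      = PySem.List.pySetD b (i : Int) (PySem.List.pyGetD b (i : Int) 0 + (L.map f).sum) := by
  induction L generalizing b with
  | nil =>
    simp only [List.foldl_nil, List.map_nil, List.sum_nil, add_zero,
      PySem.List.pySetD_natCast, PySem.List.pyGetD_natCast]
    by_cases hi : i < b.length
    · rw [List.getD_eq_getElem _ _ hi, List.set_getElem_self hi]
    · rw [List.set_eq_of_length_le (by omega)]
  | cons h t ih =>
    simp only [List.foldl_cons]
    rw [ih]
    simp only [PySem.List.pySetD_natCast, PySem.List.pyGetD_natCast, List.map_cons, List.sum_cons]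
    by_cases hi : i < b.length
    · rw [pv_getD_set_self b i hi, List.set_set]
      ring_nf
    · have hle : b.length <= i := by omega
      rw [List.set_eq_of_length_le hle, List.set_eq_of_length_le hle,
        List.set_eq_of_length_le hle]

lemma pv_condset_length (L : List Nat) (c : Nat -> Bool) (t : Nat -> Int) (b : List Int) :
    (L.foldl (fun b' i => if c i then b'.set i (b'.getD i 0 + t i) else b') b).length = b.length := by
  induction L generalizing b with
  | nil => rfl
  | cons h tl ih =>
    simp only [List.foldl_cons]
    rw [ih]
    split <;> simp

lemma pv_condset_getD (L : List Nat) (hnd : L.Nodup) (c : Nat -> Bool) (t : Nat -> Int)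
    (b : List Int) (k : Nat) (hk : k < b.length) :
    (L.foldl (fun b' i => if c i then b'.set i (b'.getD i 0 + t i) else b') b).getD k 0
      = if k ∈ L ∧ c k then b.getD k 0 + t k else b.getD k 0 := by
  induction L generalizing b with
  | nil => simp
  | cons h tl ih =>
    simp only [List.foldl_cons]
    have hkh := List.nodup_cons.mp hnd
    have hnd' := hkh.2
    by_cases hh : k = h
    · subst hh
      have hkn : k ∉ tl := hkh.1
      by_cases hc : c k
      · rw [if_pos hc, ih hnd' _ (by simpa using hk), if_neg (by simp [hkn]),
          if_pos ⟨by simp, hc⟩, pv_getD_set_self b k hk]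
      · rw [if_neg hc, ih hnd' _ hk, if_neg (by simp [hkn, hc]), if_neg (by simp [hc])]
    · by_cases hc : c h
      · rw [if_pos hc, ih hnd' _ (by simpa using hk), pv_getD_set_ne b h k hh]
        by_cases hm : k ∈ tl ∧ c k = true
        · rw [if_pos hm, if_pos ⟨by simp [hm.1], hm.2⟩]
        · rw [if_neg hm, if_neg (by simp_all)]
      · rw [if_neg hc, ih hnd' _ hk]
        by_cases hm : k ∈ tl ∧ c k = true
        · rw [if_pos hm, if_pos ⟨by simp [hm.1], hm.2⟩]
        · rw [if_neg hm, if_neg (by simp_all)]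

lemma pv_filter_range_parity (s n : Nat) (hs : s < 2) :
    (List.range n).filter (fun j => j % 2 == s)
      = (List.range ((n - s + 1) / 2)).map (fun k => s + 2 * k) := by
  induction n with
  | zero => interval_cases s <;> simp
  | succ n ih =>
    rw [List.range_succ, List.filter_append, ih]
    by_cases hp : n % 2 = s
    · have hm : (n + 1 - s + 1) / 2 = (n - s + 1) / 2 + 1 := by omega
      rw [hm, List.range_succ, List.map_append]
      simp only [List.filter_cons, List.filter_nil]
      have hb : (n % 2 == s) = true := by simpa using hp
      rw [if_pos hb]
      have hn : s + 2 * ((n - s + 1) / 2) = n := by omega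
      simp [hn]
    · have hm : (n + 1 - s + 1) / 2 = (n - s + 1) / 2 := by omega
      rw [hm]
      simp only [List.filter_cons, List.filter_nil]
      have hb : (n % 2 == s) = false := by simpa using hp
      rw [if_neg (by simp [hb])]
      simp

lemma pv_parity_range (s n : Nat) (hs : s < 2) (g : Int -> Int) :
    ((PySem.List.pyRange (s : Int) (n : Int) 2).map g).sum
      = (((List.range n).filter (fun j => j % 2 == s)).map (fun j => g (Int.ofNat j))).sum := by
  rw [pv_filter_range_parity s n hs, PySem.List.pyRange_of_pos _ _ (by norm_num)]
  apply congrArg List.sum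
  simp only [List.map_map]
  have hlen : (if (s : Int) < (n : Int) then (((n : Int) - s + 2 - 1) / 2).toNat else 0)
      = (n - s + 1) / 2 := by
    split <;> omega
  rw [hlen]
  apply List.map_congr_left
  intro k _
  simp only [Function.comp_apply]
  congr 1

-- the first-occurrence fold never overwrites an existing key
lemma pv_fold_preserve (xs : List (List Int)) (s : Int) (d : PySem.Dict (List Int) Int)
    (v : List Int) (w : Int) (hv : d.get? v = some w) :
    ((PySem.List.enumerate xs s).foldl
        (fun d p => if d.contains p.2 then d else d.insert p.2 p.1) d).get? v = some w := by
  induction xs generalizing s d with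
  | nil => simpa [PySem.List.enumerate_nil] using hv
  | cons h t ih =>
    rw [PySem.List.enumerate_cons, List.foldl_cons]
    apply ih
    by_cases hc : d.contains h
    · simpa [hc] using hv
    · have hne : v ≠ h := by
        intro he; subst he
        rw [PySem.Dict.contains_eq_isSome_get?, hv] at hc
        simp at hc
      rw [if_neg (by simp [hc]), PySem.Dict.get?_insert_of_ne _ _ hne]
      exact hv

-- the dict built by B maps each row to its first index
lemma pv_first_get? (xs : List (List Int)) (s : Int) (d : PySem.Dict (List Int) Int)
    (v : List Int) (hv : v ∈ xs) (hd : d.contains v = false) :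
    ((PySem.List.enumerate xs s).foldl
        (fun d p => if d.contains p.2 then d else d.insert p.2 p.1) d).get? v
      = some (s + (List.idxOf v xs : Int)) := by
  induction xs generalizing s d with
  | nil => simp at hv
  | cons h t ih =>
    rw [PySem.List.enumerate_cons, List.foldl_cons]
    by_cases he : v = h
    · subst he
      rw [if_neg (by simp [hd]), List.idxOf_cons_self]
      simpa using pv_fold_preserve t (s + 1) _ v s (PySem.Dict.get?_insert_self _ _ _)
    · have hvt : v ∈ t := by
        rcases List.mem_cons.mp hv with h1 | h1
        · exact absurd h1 he
        · exact h1
      rw [List.idxOf_cons_ne _ (fun hh => he hh.symm)]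
      by_cases hc : d.contains h
      · rw [if_pos hc, ih (s + 1) d hvt hd]
        push_cast; ring_nf
      · rw [if_neg (by simp [hc])]
        have hd' : (d.insert h s).contains v = false := by
          rw [PySem.Dict.contains_insert]
          simp [hd, he]
        rw [ih (s + 1) _ hvt hd']
        push_cast; ring_nf

lemma pv_index? (xs : List (List Int)) (v : List Int) (h : v ∈ xs) :
    PySem.List.index? xs v = some (List.idxOf v xs) := by
  induction xs with
  | nil => simp at h
  | cons a t ih =>
    by_cases he : a = v
    · subst he
      rw [PySem.List.index?_cons_self, List.idxOf_cons_self]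
    · have hvt : v ∈ t := by
        rcases List.mem_cons.mp h with h1 | h1
        · exact absurd h1.symm he
        · exact h1
      rw [PySem.List.index?_cons_of_ne _ he, List.idxOf_cons_ne _ he, ih hvt]
      simp

-- writing each cell of an n*[0] buffer once, in index order, is a map
lemma pv_set_fold_eq_map (n : Nat) (S : Nat -> Int) :
    (List.range n).foldl (fun b k => b.set k (b.getD k 0 + S k)) (List.replicate n (0 : Int))
      = (List.range n).map S := by
  have hshape : (fun (b : List Int) (k : Nat) => b.set k (b.getD k 0 + S k))
      = (fun b k => if (fun _ => true) k then b.set k (b.getD k 0 + S k) else b) := by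
    funext b k; simp
  rw [hshape]
  apply List.ext_getElem
  · rw [pv_condset_length]; simp
  · intro k h1 h2
    have hk : k < n := by simpa using h2
    have e1 := pv_condset_getD (List.range n) List.nodup_range (fun _ => true) S
      (List.replicate n (0 : Int)) k (by simpa using hk)
    rw [← List.getD_eq_getElem _ 0 h1, e1, if_pos ⟨by simpa using hk, rfl⟩]
    simp [hk]

-- column-major accumulation, read off at one row k
lemma pv_outer_length (J : List Nat) (n : Nat) (c : Nat -> Nat -> Bool) (t : Nat -> Nat -> Int)
    (b : List Int) :
    (J.foldl (fun b j => (List.range n).foldl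
        (fun b' i => if c i j then b'.set i (b'.getD i 0 + t i j) else b') b) b).length
      = b.length := by
  induction J generalizing b with
  | nil => rfl
  | cons h tl ih =>
    simp only [List.foldl_cons]
    rw [ih, pv_condset_length]

lemma pv_outer_getD (J : List Nat) (n k : Nat) (c : Nat -> Nat -> Bool) (t : Nat -> Nat -> Int)
    (b : List Int) (hb : b.length = n) (hk : k < n) :
    (J.foldl (fun b j => (List.range n).foldl
        (fun b' i => if c i j then b'.set i (b'.getD i 0 + t i j) else b') b) b).getD k 0
      = b.getD k 0 + ((J.filter (fun j => c k j)).map (fun j => t k j)).sum := by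
  induction J generalizing b with
  | nil => simp
  | cons h tl ih =>
    simp only [List.foldl_cons, List.filter_cons]
    have hb1 : ((List.range n).foldl
        (fun b' i => if c i h then b'.set i (b'.getD i 0 + t i h) else b') b).length = n := by
      rw [pv_condset_length, hb]
    rw [ih _ hb1]
    rw [pv_condset_getD (List.range n) List.nodup_range _ _ b k (by omega)]
    by_cases hc : c k h
    · rw [if_pos ⟨by simpa using hk, hc⟩, if_pos hc]
      simp [add_assoc]
    · rw [if_neg (by simp [hc]), if_neg (by simp [hc])]

lemma pvA_eq_NF (a : List (List Int)) (x : List Int) : mat_vec_mult a x = pvNF a x := by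
  simp only [mat_vec_mult, PySem.List.len_eq, PySem.List.pyRepeat_singleton, Int.toNat_natCast]
  rw [PySem.List.pyRange_one 0 (a.length : Int), List.foldl_map]
  rw [PySem.List.foldl_congr_mem _ _
    (fun (b : List Int) (k : Nat) => b.set k (b.getD k 0 + pvS a x k)) _ ?_]
  · rw [show ((a.length : Int) - 0).toNat = a.length by omega]
    rw [pv_set_fold_eq_map a.length (pvS a x)]
    rfl
  · intro b k hk
    have hklt : k < a.length := by
      simp only [List.mem_range] at hk
      omega
    simp only [zero_add]
    have hrow : PySem.List.pyGetD a (k : Int) [] = a.getD k [] := PySem.List.pyGetD_natCast a k []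
    have hmem : a.getD k [] ∈ a := by
      rw [List.getD_eq_getElem _ _ hklt]; exact List.getElem_mem hklt
    have hidx : PySem.List.index? a (PySem.List.pyGetD a (k : Int) []) =
        some (List.idxOf (a.getD k []) a) := by rw [hrow]; exact pv_index? a _ hmem
    rw [hidx]
    simp only [Option.getD_some]
    have hpar2 : pvPar a k < 2 := Nat.mod_lt _ (by norm_num)
    by_cases hp : pvPar a k = 0
    · have hc : (List.idxOf (a.getD k []) a % 2 == 0) = true := by
        simpa [pvPar] using hp
      rw [if_pos hc]
      rw [pv_inner (PySem.List.pyRange 0 (a.length : Int) 2) b k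
        (fun j => PySem.List.pyGetD (PySem.List.pyGetD a (k : Int) []) j 0 *
          PySem.List.pyGetD x j 0)]
      have hsum := pv_parity_range 0 a.length (by norm_num)
        (fun j => PySem.List.pyGetD (PySem.List.pyGetD a (k : Int) []) j 0 *
          PySem.List.pyGetD x j 0)
      push_cast at hsum
      rw [hsum]
      have hS : (((List.range a.length).filter (fun j => j % 2 == 0)).map
          (fun j => PySem.List.pyGetD (PySem.List.pyGetD a (k : Int) []) (Int.ofNat j) 0 *
            PySem.List.pyGetD x (Int.ofNat j) 0)).sum = pvS a x k := by
        unfold pvS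
        rw [hp]
        apply congrArg
        apply List.map_congr_left
        intro j hj
        simp only [Int.ofNat_eq_natCast, PySem.List.pyGetD_natCast, hrow]
        rfl
      rw [hS, PySem.List.pySetD_natCast, PySem.List.pyGetD_natCast]
    · have hp1 : pvPar a k = 1 := by omega
      have hc : (List.idxOf (a.getD k []) a % 2 == 0) = false := by
        simp only [beq_eq_false_iff_ne, ne_eq]
        intro h0
        unfold pvPar at hp1
        omega
      rw [if_neg (by rw [hc]; exact Bool.false_ne_true)]
      rw [pv_inner (PySem.List.pyRange 1 (a.length : Int) 2) b k
        (fun j => PySem.List.pyGetD (PySem.List.pyGetD a (k : Int) []) j 0 *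
          PySem.List.pyGetD x j 0)]
      have hsum := pv_parity_range 1 a.length (by norm_num)
        (fun j => PySem.List.pyGetD (PySem.List.pyGetD a (k : Int) []) j 0 *
          PySem.List.pyGetD x j 0)
      push_cast at hsum
      rw [hsum]
      have hS : (((List.range a.length).filter (fun j => j % 2 == 1)).map
          (fun j => PySem.List.pyGetD (PySem.List.pyGetD a (k : Int) []) (Int.ofNat j) 0 *
            PySem.List.pyGetD x (Int.ofNat j) 0)).sum = pvS a x k := by
        unfold pvS
        rw [hp1]
        apply congrArg
        apply List.map_congr_left
        intro j hj
        simp only [Int.ofNat_eq_natCast, PySem.List.pyGetD_natCast, hrow]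
        rfl
      rw [hS, PySem.List.pySetD_natCast, PySem.List.pyGetD_natCast]

-- the dict of B's first pass, looked up at a row of a, is the row's first index
lemma pv_first_getD (a : List (List Int)) (v : List Int) (hv : v ∈ a) :
    ((PySem.List.pyRange 0 (PySem.List.len a) 1).foldl
      (fun d i => if d.contains (PySem.List.pyGetD a i []) then d
        else d.insert (PySem.List.pyGetD a i []) i) PySem.Dict.empty).getD v 0
      = ((List.idxOf v a : Nat) : Int) := by
  have hfe : (PySem.List.enumerate a 0).foldl
      (fun d p => if d.contains p.2 then d else d.insert p.2 p.1) PySem.Dict.empty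
      = (PySem.List.pyRange 0 (PySem.List.len a) 1).foldl
        (fun d i => if d.contains (PySem.List.pyGetD a i []) then d
          else d.insert (PySem.List.pyGetD a i []) i) PySem.Dict.empty := by
    rw [PySem.List.enumerate_eq_map_pyRange a ([] : List Int), List.foldl_map]
  rw [← hfe, PySem.Dict.getD_eq_get?_getD,
    pv_first_get? a 0 _ v hv (by simp [PySem.Dict.contains_empty])]
  simp

-- B's parity table holds each row's first-occurrence parity
lemma pvB_parity_val (a : List (List Int)) (i : Nat) (h : i < a.length) :
    (a.map (fun row => PySem.Int.mod
        (((PySem.List.pyRange 0 (PySem.List.len a) 1).foldl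
          (fun d i => if d.contains (PySem.List.pyGetD a i []) then d
            else d.insert (PySem.List.pyGetD a i []) i) PySem.Dict.empty).getD row 0)
        2)).getD i 0 = ((pvPar a i : Nat) : Int) := by
  rw [List.getD_eq_getElem _ _ (by simpa using h), List.getElem_map]
  rw [pv_first_getD a _ (List.getElem_mem h)]
  rw [show (2 : Int) = ((2 : Nat) : Int) by norm_num, PySem.Int.mod_natCast]
  unfold pvPar
  rw [List.getD_eq_getElem _ _ h]

-- B with an abstract parity table equals the normal form
lemma pvB_gen (a : List (List Int)) (x : List Int) (P : List Int)
    (hPval : ∀ i, i < a.length → P.getD i 0 = ((pvPar a i : Nat) : Int)) :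
    (PySem.List.pyRange 0 (PySem.List.len a) 1).foldl (fun b j =>
      (PySem.List.pyRange 0 (PySem.List.len a) 1).foldl (fun b i =>
        if PySem.List.pyGetD P i 0 == PySem.Int.mod j 2 then
          PySem.List.pySetD b i (PySem.List.pyGetD b i 0 +
            PySem.List.pyGetD (PySem.List.pyGetD a i []) j 0 * PySem.List.pyGetD x j 0)
        else b) b)
      (PySem.List.pyRepeat [(0 : Int)] (PySem.List.len a)) = pvNF a x := by
  simp only [PySem.List.len_eq, PySem.List.pyRepeat_singleton, Int.toNat_natCast]
  rw [PySem.List.pyRange_one 0 (a.length : Int)]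
  simp only [List.foldl_map, zero_add, sub_zero, Int.toNat_natCast,
    PySem.List.pySetD_natCast, PySem.List.pyGetD_natCast]
  apply List.ext_getElem
  · rw [pv_outer_length]
    simp [pvNF]
  · intro k h1 h2
    have hk : k < a.length := by
      have h1' := h1
      rwa [pv_outer_length, List.length_replicate] at h1'
    rw [← List.getD_eq_getElem _ 0 h1]
    rw [pv_outer_getD (List.range a.length) a.length k _ _ _ (by simp) hk]
    have hfilter : (List.range a.length).filter
          (fun (j : Nat) => P.getD k 0 == PySem.Int.mod (j : Int) 2)
        = (List.range a.length).filter (fun j => j % 2 == pvPar a k) := by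
      apply List.filter_congr
      intro j hj
      rw [hPval k hk, show (2 : Int) = ((2 : Nat) : Int) by norm_num,
        PySem.Int.mod_natCast]
      simp only [Bool.beq_comm]
      simp
      omega
    rw [hfilter]
    simp only [pvNF, List.getElem_map, List.getElem_range, pvS]
    simp [List.getD_eq_getElem?_getD, hk]
    apply congrArg List.sum
    apply List.map_congr_left
    intro j hj
    simp only [pvRowf]
    rw [List.getD_eq_getElem a [] hk, List.getD_eq_getElem?_getD, List.getD_eq_getElem?_getD]

lemma pvB_eq_NF (a : List (List Int)) (x : List Int) : mat_vec_mult_alt a x = pvNF a x :=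
  pvB_gen a x _ (fun i h => pvB_parity_val a i h)

-- ===== VERDICT (by name: the statement is the Claim_ definition above) =====
theorem mat_vec_mult_spec : Claim_equal_mat_vec_mult := by
  intro a x _ _
  unfold Spec_mat_vec_mult
  rw [pvA_eq_NF, pvB_eq_NF]
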